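-- pv_equiv track=rewrite | github.com/nightjuggler/aoc | 2019/22.py | shuffle_v1
-- ===== SOURCE A (Python) =====
-- def shuffle_v1(actions, pos, size, reps):
-- 	for _ in range(reps):
-- 		for action, arg in actions:
-- 			if action == 0:
-- 				pos -= arg
-- 			elif action == 1:
-- 				pos *= arg
-- 			else:
-- 				pos = -(pos + 1)
-- 			pos %= size
-- 	return pos
-- ===== SOURCE B (Python) =====
-- def shuffle_v1(actions, pos, size, reps):
-- 	if reps <= 0 or not actions:
-- 		return pos
-- 	# compose the whole action list into one affine map pos -> a*pos + b (mod size)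
-- 	a, b = 1, 0
-- 	for action, arg in actions:
-- 		if action == 0:
-- 			b -= arg
-- 		elif action == 1:
-- 			a *= arg
-- 			b *= arg
-- 		else:
-- 			a = -a
-- 			b = -b - 1
-- 		a %= size
-- 		b %= size
-- 	# raise the affine map to the reps-th power by binary exponentiation
-- 	ra, rb = 1, 0
-- 	n = reps
-- 	while n:
-- 		if n & 1:
-- 			ra, rb = (a * ra) % size, (a * rb + b) % size
-- 		a, b = (a * a) % size, (a * b + b) % size
-- 		n >>= 1
-- 	return (ra * pos + rb) % size
-- ===== Notes on version B (the rewrite author's own statement) =====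
-- stated objective: faster
-- what changed: B composes the whole action list into a single affine map pos -> a*pos+b mod size and raises that map to the reps-th power by binary exponentiation, instead of replaying every action reps times.
import Mathlib
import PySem

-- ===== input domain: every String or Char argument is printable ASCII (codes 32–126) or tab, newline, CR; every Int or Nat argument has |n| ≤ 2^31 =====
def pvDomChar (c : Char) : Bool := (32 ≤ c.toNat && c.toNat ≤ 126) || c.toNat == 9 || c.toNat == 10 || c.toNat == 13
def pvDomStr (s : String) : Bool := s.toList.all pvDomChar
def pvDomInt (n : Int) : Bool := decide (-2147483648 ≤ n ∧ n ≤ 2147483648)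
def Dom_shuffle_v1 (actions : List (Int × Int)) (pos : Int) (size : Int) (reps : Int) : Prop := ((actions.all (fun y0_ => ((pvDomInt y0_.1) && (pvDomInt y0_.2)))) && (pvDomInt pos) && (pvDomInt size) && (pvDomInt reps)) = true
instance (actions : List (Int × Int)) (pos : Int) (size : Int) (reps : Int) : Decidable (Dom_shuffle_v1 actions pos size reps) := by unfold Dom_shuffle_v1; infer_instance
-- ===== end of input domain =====

-- B composes all actions into one affine map pos ↦ a*pos+b (mod size) and raises it to the
-- reps-th power by binary exponentiation, instead of replaying every action reps times (faster).

-- ===== PORT A =====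
-- one inner-loop body: apply one action, then pos %= size
def shuffle_v1_step (size : Int) (pos : Int) (aa : Int × Int) : Int :=
  let p := if aa.1 == 0 then pos - aa.2 else if aa.1 == 1 then pos * aa.2 else -(pos + 1)
  PySem.Int.mod p size

def shuffle_v1 (actions : List (Int × Int)) (pos : Int) (size : Int) (reps : Int) : Int :=
  (PySem.List.pyRange 0 reps 1).foldl
    (fun p _ => actions.foldl (shuffle_v1_step size) p) pos

-- ===== PORT B =====
-- one step of B's composition loop: fold one action into the affine pair (a, b), mod size
def shuffle_v1_alt_compose (size : Int) (ab : Int × Int) (aa : Int × Int) : Int × Int :=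
  let p :=
    if aa.1 == 0 then (ab.1, ab.2 - aa.2)
    else if aa.1 == 1 then (ab.1 * aa.2, ab.2 * aa.2)
    else (-ab.1, -ab.2 - 1)
  (PySem.Int.mod p.1 size, PySem.Int.mod p.2 size)

-- B's `while n:` binary-exponentiation loop over the affine pair
def shuffle_v1_alt_pow (size : Int) (n : Nat) (a b ra rb : Int) : Int × Int :=
  if n = 0 then (ra, rb)
  else
    let ra' := if n % 2 = 1 then PySem.Int.mod (a * ra) size else ra
    let rb' := if n % 2 = 1 then PySem.Int.mod (a * rb + b) size else rb
    shuffle_v1_alt_pow size (n / 2) (PySem.Int.mod (a * a) size) (PySem.Int.mod (a * b + b) size) ra' rb'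
  termination_by n
  decreasing_by omega

def shuffle_v1_alt (actions : List (Int × Int)) (pos : Int) (size : Int) (reps : Int) : Int :=
  if reps ≤ 0 ∨ actions = [] then pos
  else
    let ab := actions.foldl (shuffle_v1_alt_compose size) (1, 0)
    let r := shuffle_v1_alt_pow size reps.toNat ab.1 ab.2 1 0
    PySem.Int.mod (r.1 * pos + r.2) size

-- ===== PRECONDITION & SPEC =====
-- Pre_ excludes exactly the inputs where Python A raises ZeroDivisionError:
-- size = 0 while at least one `pos %= size` is executed (reps > 0 and actions nonempty).
def Pre_shuffle_v1 (actions : List (Int × Int)) (pos : Int) (size : Int) (reps : Int) : Prop :=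
  0 < reps → actions ≠ [] → size ≠ 0
instance (actions : List (Int × Int)) (pos : Int) (size : Int) (reps : Int) : Decidable (Pre_shuffle_v1 actions pos size reps) := by unfold Pre_shuffle_v1; infer_instance

def pvWitness_shuffle_v1 : (List (Int × Int)) × Int × Int × Int := ([(0, 3), (2, 0), (1, 5)], 2, 10, 7)

def Spec_shuffle_v1 (actions : List (Int × Int)) (pos : Int) (size : Int) (reps : Int) (out : Int) : Prop := out = shuffle_v1_alt actions pos size reps
instance (actions : List (Int × Int)) (pos : Int) (size : Int) (reps : Int) (out : Int) : Decidable (Spec_shuffle_v1 actions pos size reps out) := by unfold Spec_shuffle_v1; infer_instance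

-- ===== CLAIM (what is proved, stated in full; the proofs are below) =====
def Claim_equal_shuffle_v1 : Prop := ∀ (actions : List (Int × Int)) (pos : Int) (size : Int) (reps : Int), Dom_shuffle_v1 actions pos size reps → Pre_shuffle_v1 actions pos size reps → Spec_shuffle_v1 actions pos size reps (shuffle_v1 actions pos size reps)

-- ===== LEMMAS AND PROOFS =====

-- congruent integers have the same Python mod (floored mod)
theorem pv_fmod_congr (s x y : Int) (hs : s ≠ 0) (h : s ∣ (x - y)) : x.fmod s = y.fmod s := by
  have hx : s ∣ (x - x.fmod s) := ⟨x.fdiv s, by have := Int.fmod_add_mul_fdiv x s; linarith⟩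
  have hy : s ∣ (y - y.fmod s) := ⟨y.fdiv s, by have := Int.fmod_add_mul_fdiv y s; linarith⟩
  have hd : s ∣ (x.fmod s - y.fmod s) := by
    have he : x.fmod s - y.fmod s = (x - y) - (x - x.fmod s) + (y - y.fmod s) := by ring
    rw [he]; exact dvd_add (dvd_sub h hx) hy
  have hb : |x.fmod s - y.fmod s| < |s| := by
    rcases lt_or_gt_of_ne hs with hneg | hpos
    · have h1 := PySem.Int.mod_neg_bounds x hneg
      have h2 := PySem.Int.mod_neg_bounds y hneg
      simp [PySem.Int.mod] at h1 h2
      rw [abs_of_neg hneg, abs_lt]; omega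
    · have h1 := PySem.Int.mod_nonneg x hpos
      have h2 := PySem.Int.mod_nonneg y hpos
      have h3 := PySem.Int.mod_lt x hpos
      have h4 := PySem.Int.mod_lt y hpos
      simp [PySem.Int.mod] at h1 h2 h3 h4
      rw [abs_of_pos hpos, abs_lt]; omega
  have := Int.eq_zero_of_abs_lt_dvd ((abs_dvd s _).mpr hd) hb
  omega

theorem pv_fmod_modeq (s x : Int) : Int.ModEq s (x.fmod s) x :=
  Int.modEq_iff_dvd.mpr ⟨x.fdiv s, by have := Int.fmod_add_mul_fdiv x s; linarith⟩

theorem pv_fmod_congr' {s x y : Int} (hs : s ≠ 0) (h : Int.ModEq s x y) : x.fmod s = y.fmod s :=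
  pv_fmod_congr s x y hs (by have := h.symm.dvd; simpa using this)

-- the mathematical affine map both programs compute with
def pvG (s a b p : Int) : Int := (a * p + b).fmod s

-- one A-step on any q congruent to a*p+b equals the composed affine pair applied to p
theorem pv_step_cong {s : Int} (hs : s ≠ 0) (aa : Int × Int) (a b p q : Int)
    (hq : Int.ModEq s q (a * p + b)) :
    shuffle_v1_step s q aa =
      ((shuffle_v1_alt_compose s (a, b) aa).1 * p + (shuffle_v1_alt_compose s (a, b) aa).2).fmod s := by
  unfold shuffle_v1_step shuffle_v1_alt_compose
  by_cases h0 : aa.1 == 0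
  · simp only [h0, if_true, PySem.Int.mod]
    apply pv_fmod_congr' hs
    calc q - aa.2 ≡ (a * p + b) - aa.2 [ZMOD s] := hq.sub_right aa.2
      _ = a * p + (b - aa.2) := by ring
      _ ≡ (a.fmod s) * p + ((b - aa.2).fmod s) [ZMOD s] :=
          (((pv_fmod_modeq s a).mul_right p).add (pv_fmod_modeq s (b - aa.2))).symm
  · by_cases h1 : aa.1 == 1
    · simp only [h0, h1, if_true, PySem.Int.mod]
      apply pv_fmod_congr' hs
      calc q * aa.2 ≡ (a * p + b) * aa.2 [ZMOD s] := hq.mul_right aa.2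
        _ = (a * aa.2) * p + (b * aa.2) := by ring
        _ ≡ ((a * aa.2).fmod s) * p + ((b * aa.2).fmod s) [ZMOD s] :=
            (((pv_fmod_modeq s (a * aa.2)).mul_right p).add (pv_fmod_modeq s (b * aa.2))).symm
    · simp only [h0, h1, PySem.Int.mod]
      apply pv_fmod_congr' hs
      calc -(q + 1) ≡ -((a * p + b) + 1) [ZMOD s] := (hq.add_right 1).neg
        _ = (-a) * p + (-b - 1) := by ring
        _ ≡ ((-a).fmod s) * p + ((-b - 1).fmod s) [ZMOD s] :=
            (((pv_fmod_modeq s (-a)).mul_right p).add (pv_fmod_modeq s (-b - 1))).symm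

-- A's inner fold, started from a reduced affine value, equals the composed pair applied to p
theorem pv_inner_fold {s : Int} (hs : s ≠ 0) (acts : List (Int × Int)) :
    ∀ (a b p : Int),
      acts.foldl (shuffle_v1_step s) ((a * p + b).fmod s) =
        ((acts.foldl (shuffle_v1_alt_compose s) (a, b)).1 * p +
         (acts.foldl (shuffle_v1_alt_compose s) (a, b)).2).fmod s := by
  induction acts with
  | nil => intro a b p; simp
  | cons x t ih =>
    intro a b p
    have hstep := pv_step_cong hs x a b p ((a * p + b).fmod s) (pv_fmod_modeq s _)
    simp only [List.foldl_cons, hstep]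
    have := ih (shuffle_v1_alt_compose s (a, b) x).1 (shuffle_v1_alt_compose s (a, b) x).2 p
    simpa using this

-- A's inner fold from a raw start value (nonempty action list)
theorem pv_inner_fold_raw {s : Int} (hs : s ≠ 0) (acts : List (Int × Int)) (hne : acts ≠ [])
    (p : Int) :
    acts.foldl (shuffle_v1_step s) p =
      ((acts.foldl (shuffle_v1_alt_compose s) (1, 0)).1 * p +
       (acts.foldl (shuffle_v1_alt_compose s) (1, 0)).2).fmod s := by
  cases acts with
  | nil => exact absurd rfl hne
  | cons x t =>
    have hq : Int.ModEq s p (1 * p + 0) := by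
      have : (1 : Int) * p + 0 = p := by ring
      rw [this]
    have hstep := pv_step_cong hs x 1 0 p p hq
    simp only [List.foldl_cons, hstep]
    have := pv_inner_fold hs t (shuffle_v1_alt_compose s (1, 0) x).1 (shuffle_v1_alt_compose s (1, 0) x).2 p
    simpa using this

-- squaring the affine pair squares the map pvG
theorem pv_g_sq {s : Int} (hs : s ≠ 0) (a b : Int) :
    pvG s ((a * a).fmod s) ((a * b + b).fmod s) = pvG s a b ∘ pvG s a b := by
  funext q
  unfold pvG Function.comp
  apply pv_fmod_congr' hs
  calc ((a * a).fmod s) * q + ((a * b + b).fmod s)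
      ≡ (a * a) * q + (a * b + b) [ZMOD s] :=
        ((pv_fmod_modeq s (a * a)).mul_right q).add (pv_fmod_modeq s (a * b + b))
    _ = a * (a * q + b) + b := by ring
    _ ≡ a * ((a * q + b).fmod s) + b [ZMOD s] :=
        (((pv_fmod_modeq s (a * q + b)).mul_left a).add_right b).symm

-- f ∘ f is f iterated twice
theorem pv_comp_sq {α : Type} (f : α → α) : f ∘ f = f^[2] := by
  funext x; simp [Function.iterate_succ_apply]

-- correctness of B's binary-exponentiation loop
theorem pv_pow_correct {s : Int} (hs : s ≠ 0) (n : Nat) :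
    ∀ (a b ra rb p : Int),
      ((shuffle_v1_alt_pow s n a b ra rb).1 * p + (shuffle_v1_alt_pow s n a b ra rb).2).fmod s =
        (pvG s a b)^[n] ((ra * p + rb).fmod s) := by
  induction n using Nat.strong_induction_on with
  | _ n ih =>
    intro a b ra rb p
    by_cases hn : n = 0
    · subst hn; rw [shuffle_v1_alt_pow]; simp
    · rw [shuffle_v1_alt_pow]
      simp only [hn, if_false, show PySem.Int.mod = Int.fmod from rfl]
      have hlt : n / 2 < n := by omega
      have hsq := pv_g_sq hs a b
      by_cases hodd : n % 2 = 1
      · simp only [hodd, if_true]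
        rw [ih (n / 2) hlt]
        have hfirst : (((a * ra).fmod s) * p + ((a * rb + b).fmod s)).fmod s
            = pvG s a b ((ra * p + rb).fmod s) := by
          unfold pvG
          apply pv_fmod_congr' hs
          calc ((a * ra).fmod s) * p + ((a * rb + b).fmod s)
              ≡ (a * ra) * p + (a * rb + b) [ZMOD s] :=
                ((pv_fmod_modeq s (a * ra)).mul_right p).add (pv_fmod_modeq s (a * rb + b))
            _ = a * (ra * p + rb) + b := by ring
            _ ≡ a * ((ra * p + rb).fmod s) + b [ZMOD s] :=
                (((pv_fmod_modeq s (ra * p + rb)).mul_left a).add_right b).symm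
        rw [hfirst, hsq, pv_comp_sq, ← Function.iterate_mul, ← Function.iterate_succ_apply]
        congr 1
        omega
      · simp only [hodd, if_false]
        rw [ih (n / 2) hlt]
        rw [hsq, pv_comp_sq, ← Function.iterate_mul]
        congr 1
        omega

-- a foldl that ignores its state-independent list elements entirely returns the start state
theorem pv_foldl_id {α β : Type} (l : List α) : ∀ p : β, l.foldl (fun p _ => p) p = p := by
  induction l with
  | nil => intro p; rfl
  | cons x t ih => intro p; simp [ih p]

-- a foldl that ignores the list elements is function iteration
theorem pv_foldl_iterate {α β : Type} (F : β → β) (l : List α) :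
    ∀ p : β, l.foldl (fun p _ => F p) p = F^[l.length] p := by
  induction l with
  | nil => intro p; simp
  | cons x t ih =>
    intro p
    simp only [List.foldl_cons, List.length_cons, ih, Function.iterate_succ_apply]

-- ===== VERDICT (by name: the statement is the Claim_ definition above) =====
theorem shuffle_v1_spec : Claim_equal_shuffle_v1 := by
  intro actions pos size reps _hdom hpre
  unfold Spec_shuffle_v1 shuffle_v1 shuffle_v1_alt
  by_cases htriv : reps ≤ 0 ∨ actions = []
  · simp only [htriv, if_true]
    rcases htriv with h | h
    · have : PySem.List.pyRange 0 reps 1 = [] := by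
        simp [PySem.List.pyRange]; omega
      rw [this]; simp
    · subst h
      simp only [List.foldl_nil]
      exact pv_foldl_id _ pos
  · simp only [htriv, if_false, show PySem.Int.mod = Int.fmod from rfl]
    push_neg at htriv
    obtain ⟨hreps, hne⟩ := htriv
    have hs : size ≠ 0 := hpre (by omega) hne
    set C := actions.foldl (shuffle_v1_alt_compose size) (1, 0) with hC
    have hF : (fun p => actions.foldl (shuffle_v1_step size) p) = pvG size C.1 C.2 := by
      funext p
      exact pv_inner_fold_raw hs actions hne p
    rw [pv_foldl_iterate, hF]
    have hlen : (PySem.List.pyRange 0 reps 1).length = reps.toNat := by simp [pysem]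
    rw [hlen]
    rw [pv_pow_correct hs reps.toNat C.1 C.2 1 0 pos]
    have h1 : ((1 : Int) * pos + 0).fmod size = pos.fmod size := by norm_num
    rw [h1]
    obtain ⟨m, hm⟩ : ∃ m, reps.toNat = m + 1 := ⟨reps.toNat - 1, by omega⟩
    rw [hm, Function.iterate_succ_apply, Function.iterate_succ_apply]
    congr 1
    unfold pvG
    apply pv_fmod_congr' hs
    exact (((pv_fmod_modeq size pos).mul_left C.1).add_right C.2).symm
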